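-- pv_equiv track=rewrite | github.com/adirizq/food-and-drink-description-generator-in-bahasa | app.py | prepare_corpus
-- ===== SOURCE A (Python) =====
-- def prepare_corpus(data, word_to_idx):
--     sequences = []
--     for line in data:
--         tokens = line
--         for i in range(1, len(tokens)):
--             i_gram_sequence = tokens[:i+1]
--             i_gram_sequence_ids = []
--
--             for j, token in enumerate(i_gram_sequence):
--                 try:
--                     i_gram_sequence_ids.append(word_to_idx[token])
--                 except:
--                     i_gram_sequence_ids.append(0)
--
--             sequences.append(i_gram_sequence_ids)
--     return sequences
-- ===== SOURCE B (Python) =====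
-- def prepare_corpus(data, word_to_idx):
--     sequences = []
--     for line in data:
--         ids = []
--         for token in line:
--             try:
--                 ids.append(word_to_idx[token])
--             except:
--                 ids.append(0)
--         sequences.extend(ids[:i + 1] for i in range(1, len(ids)))
--     return sequences
-- ===== Notes on version B (the rewrite author's own statement) =====
-- stated objective: faster
-- what changed: B converts each line's tokens to ids once in a single pass and then emits prefix slices of that id list, instead of re-converting every token of every prefix inside the nested loop.
import Mathlib
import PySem

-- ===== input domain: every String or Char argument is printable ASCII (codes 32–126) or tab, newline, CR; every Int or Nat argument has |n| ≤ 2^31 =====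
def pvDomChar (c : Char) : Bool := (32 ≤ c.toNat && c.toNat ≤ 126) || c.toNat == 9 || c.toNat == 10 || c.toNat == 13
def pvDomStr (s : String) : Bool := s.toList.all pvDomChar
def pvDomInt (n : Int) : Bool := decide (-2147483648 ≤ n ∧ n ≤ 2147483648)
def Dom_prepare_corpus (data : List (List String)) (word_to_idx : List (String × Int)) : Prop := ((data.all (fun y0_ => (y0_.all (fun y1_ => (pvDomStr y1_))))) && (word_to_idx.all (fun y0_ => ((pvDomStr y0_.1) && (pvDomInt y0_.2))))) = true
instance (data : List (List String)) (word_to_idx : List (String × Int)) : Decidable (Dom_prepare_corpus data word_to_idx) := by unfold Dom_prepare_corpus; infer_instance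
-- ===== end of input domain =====

-- B converts each line to ids once, then emits prefix slices; A re-converts every token of every prefix.

-- ===== PORT A =====
-- word_to_idx[token] with the bare except: first match in the assoc list, 0 on KeyError
def prepare_corpus (data : List (List String)) (word_to_idx : List (String × Int)) : List (List Int) :=
  data.foldl (fun sequences line =>
    let tokens := line
    (PySem.List.pyRange 1 (tokens.length : Int)).foldl (fun sequences i =>
      let i_gram_sequence := PySem.List.slice tokens none (some (i + 1))
      let i_gram_sequence_ids :=
        i_gram_sequence.foldl (fun acc token => acc ++ [((word_to_idx.lookup token).getD 0)]) []
      sequences ++ [i_gram_sequence_ids]) sequences) []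

-- ===== PORT B =====
def prepare_corpus_alt (data : List (List String)) (word_to_idx : List (String × Int)) : List (List Int) :=
  data.foldl (fun sequences line =>
    let ids := line.map (fun token => ((word_to_idx.lookup token).getD 0))
    sequences ++ (PySem.List.pyRange 1 (ids.length : Int)).map
      (fun i => PySem.List.slice ids none (some (i + 1)))) []

-- ===== PRECONDITION & SPEC =====
def Spec_prepare_corpus (data : List (List String)) (word_to_idx : List (String × Int)) (out : List (List Int)) : Prop := out = prepare_corpus_alt data word_to_idx
instance (data : List (List String)) (word_to_idx : List (String × Int)) (out : List (List Int)) : Decidable (Spec_prepare_corpus data word_to_idx out) := by unfold Spec_prepare_corpus; infer_instance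

-- ===== CLAIM (what is proved, stated in full; the proofs are below) =====
def Claim_equal_prepare_corpus : Prop := ∀ (data : List (List String)) (word_to_idx : List (String × Int)), Dom_prepare_corpus data word_to_idx → Spec_prepare_corpus data word_to_idx (prepare_corpus data word_to_idx)

-- ===== LEMMAS AND PROOFS =====

-- A's inner per-line loop equals B's slice-of-mapped-ids expression
theorem pv_line_eq (w : List (String × Int)) (line : List String) (acc : List (List Int)) :
    (PySem.List.pyRange 1 (line.length : Int)).foldl (fun sequences i =>
        sequences ++ [(PySem.List.slice line none (some (i + 1))).foldl
          (fun acc token => acc ++ [((w.lookup token).getD 0)]) []]) acc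
    = acc ++ (PySem.List.pyRange 1 ((line.map (fun token => ((w.lookup token).getD 0))).length : Int)).map
        (fun i => PySem.List.slice (line.map (fun token => ((w.lookup token).getD 0))) none (some (i + 1))) := by
  rw [PySem.List.foldl_append_singleton_eq_map]
  simp only [List.length_map]
  congr 1
  apply List.map_congr_left
  intro i hi
  have h1 : (1 : Int) ≤ i := (PySem.List.mem_pyRange_one.mp hi).1
  rw [PySem.List.foldl_append_singleton_eq_map, List.nil_append,
      PySem.List.slice_to _ (by omega), PySem.List.slice_to _ (by omega), List.map_take]

theorem prepare_corpus_eq (data : List (List String)) (w : List (String × Int)) :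
    prepare_corpus data w = prepare_corpus_alt data w := by
  unfold prepare_corpus prepare_corpus_alt
  exact List.foldl_ext _ _ [] (fun acc line _ => pv_line_eq w line acc)

-- ===== VERDICT (by name: the statement is the Claim_ definition above) =====
theorem prepare_corpus_spec : Claim_equal_prepare_corpus := by
  intro data w _
  exact prepare_corpus_eq data w
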